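-- pv_equiv track=rewrite | github.com/datapitch-it/manintheloop | enrich_data.py | is_definitely_not_company
-- ===== SOURCE A (Python) =====
-- def is_definitely_not_company(description, label):
--     if not description: return False
--     desc = description.lower()
--
--     # Blacklist for entities that often shadow companies
--     blacklist = [
--         'country', 'sovereign state', 'nation', 'republic', 'former country',
--         'city', 'municipality', 'village', 'human', 'person', 'born 19', 'born 20',
--         'chemical element', 'isotope', 'mythological', 'asteroid', 'comet', 'island'
--     ]
--
--     if any(word in desc for word in blacklist):
--         return True
--     return False
-- ===== SOURCE B (Python) =====
-- BLACKLIST = [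
--     'country', 'sovereign state', 'nation', 'republic', 'former country',
--     'city', 'municipality', 'village', 'human', 'person', 'born 19', 'born 20',
--     'chemical element', 'isotope', 'mythological', 'asteroid', 'comet', 'island'
-- ]
--
-- # Index the blacklist by first character once; then a single left-to-right pass
-- # over the description tests, at each position, only the words that could start there.
-- FIRST = {}
-- for w in BLACKLIST:
--     FIRST.setdefault(w[0], []).append(w)
--
-- def is_definitely_not_company(description, label):
--     if not description:
--         return False
--     desc = description.lower()
--     return any(desc.startswith(w, i)
--                for i, c in enumerate(desc)
--                for w in FIRST.get(c, []))
-- ===== Notes on version B (the rewrite author's own statement) =====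
-- stated objective: alternative
-- what changed: B precompiles the blacklist into a first-character index (a dict from initial letter to the words starting with it) and makes a single left-to-right pass over the description, testing at each position only the words whose first letter occurs there, instead of one full substring scan per blacklisted word.
import Mathlib
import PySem

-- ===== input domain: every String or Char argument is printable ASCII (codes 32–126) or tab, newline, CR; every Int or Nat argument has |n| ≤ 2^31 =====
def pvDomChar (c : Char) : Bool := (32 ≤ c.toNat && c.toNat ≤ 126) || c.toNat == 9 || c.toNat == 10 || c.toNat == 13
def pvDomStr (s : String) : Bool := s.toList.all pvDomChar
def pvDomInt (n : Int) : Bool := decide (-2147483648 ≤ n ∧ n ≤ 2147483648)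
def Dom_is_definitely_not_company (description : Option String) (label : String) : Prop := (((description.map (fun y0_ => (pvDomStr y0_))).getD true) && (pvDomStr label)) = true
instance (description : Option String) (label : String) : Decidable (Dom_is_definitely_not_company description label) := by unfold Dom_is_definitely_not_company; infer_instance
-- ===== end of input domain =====

-- B indexes the blacklist by first character once and then makes a single
-- left-to-right pass over the description, testing at each position only the
-- words whose first letter matches there (objective: alternative).

def pvBlacklist : List String :=
  ["country", "sovereign state", "nation", "republic", "former country",
   "city", "municipality", "village", "human", "person", "born 19", "born 20",
   "chemical element", "isotope", "mythological", "asteroid", "comet", "island"]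

-- ===== PORT A =====
def is_definitely_not_company (description : Option String) (label : String) : Bool :=
  match description with
  | none => false                       -- 'if not description: return False' (None case)
  | some d =>
    if d.toList = [] then false         -- '' is falsy too
    else
      let desc := PySem.Str.lower d
      if pvBlacklist.any (fun w => PySem.Str.isIn w desc) then true else false

-- ===== PORT B =====
-- FIRST = {}; for w in BLACKLIST: FIRST.setdefault(w[0], []).append(w)
-- (setdefault+append has the effect d[c] = d.get(c, []) + [w]; w[0] on these
-- nonempty literals is w.toList.headD ' ')
def pvFirst : PySem.Dict Char (List String) :=
  pvBlacklist.foldl (fun d w => d.modify (w.toList.headD ' ') [] (· ++ [w])) PySem.Dict.empty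

def is_definitely_not_company_alt (description : Option String) (label : String) : Bool :=
  match description with
  | none => false
  | some d =>
    if d.toList = [] then false
    else
      let desc := PySem.Str.lower d
      -- any(desc.startswith(w, i) for i, c in enumerate(desc) for w in FIRST.get(c, []));
      -- desc.startswith(w, i) ported as startswith of the drop — exact since enumerate's i ≥ 0
      (PySem.List.enumerate desc.toList).any fun ic =>
        (pvFirst.getD ic.2 []).any fun w =>
          PySem.Chars.startswith (desc.toList.drop ic.1.toNat) w.toList

-- ===== PRECONDITION & SPEC =====
def Spec_is_definitely_not_company (description : Option String) (label : String) (out : Bool) : Prop := out = is_definitely_not_company_alt description label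
instance (description : Option String) (label : String) (out : Bool) : Decidable (Spec_is_definitely_not_company description label out) := by unfold Spec_is_definitely_not_company; infer_instance

-- ===== CLAIM (what is proved, stated in full; the proofs are below) =====
def Claim_equal_is_definitely_not_company : Prop := ∀ (description : Option String) (label : String), Dom_is_definitely_not_company description label → Spec_is_definitely_not_company description label (is_definitely_not_company description label)

-- ===== LEMMAS AND PROOFS =====

-- the first-character index holds exactly the blacklist words starting with that character
theorem pvFirst_getD (c : Char) :
    pvFirst.getD c [] = pvBlacklist.filter (fun w => w.toList.headD ' ' == c) := by
  have h : pvFirst = (pvBlacklist.map (fun w => (w.toList.headD ' ', w))).foldl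
      (fun d p => d.modify p.1 [] (· ++ [p.2])) PySem.Dict.empty := by
    rw [List.foldl_map]
    rfl
  rw [h, PySem.Dict.getD_foldl_modify_append, PySem.Dict.getD_empty]
  simp [List.filter_map, List.map_map, Function.comp_def]

theorem pvKey (s : List Char) :
    (pvBlacklist.any fun w => PySem.Chars.isIn w.toList s) =
    ((PySem.List.enumerate s).any fun ic =>
      (pvFirst.getD ic.2 []).any fun w =>
        PySem.Chars.startswith (s.drop ic.1.toNat) w.toList) := by
  have hbl : ∀ w ∈ pvBlacklist, w.toList ≠ [] := by decide
  rw [Bool.eq_iff_iff]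
  simp only [List.any_eq_true, PySem.List.mem_enumerate_iff]
  constructor
  · rintro ⟨w, hw, hin⟩
    obtain ⟨j, hpre⟩ := (PySem.Chars.exists_prefix_drop_iff_isIn w.toList s).mpr hin
    have hj : j < s.length := by
      by_contra hge
      rw [List.drop_eq_nil_of_le (by omega)] at hpre
      exact hbl w hw (List.prefix_nil.mp hpre)
    refine ⟨((0 : Int) + j, s[j]), ⟨j, hj, rfl⟩, w, ?_, ?_⟩
    · rw [pvFirst_getD, List.mem_filter]
      refine ⟨hw, ?_⟩
      have hh : w.toList.head? = some s[j] := by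
        obtain ⟨t, ht⟩ := hpre
        have := @List.head?_drop _ s j
        rw [← ht, List.getElem?_eq_getElem hj] at this
        cases hwt : w.toList with
        | nil => exact absurd hwt (hbl w hw)
        | cons a l => rw [hwt] at this; simpa using this
      simp [List.headD_eq_head?_getD, hh]
    · have : ((0 : Int) + (j : Int)).toNat = j := by omega
      rw [this, PySem.Chars.startswith_iff]
      exact hpre
  · rintro ⟨ic, ⟨k, hk, rfl⟩, w, hw, hsw⟩
    have hwbl : w ∈ pvBlacklist := by
      rw [pvFirst_getD, List.mem_filter] at hw
      exact hw.1
    refine ⟨w, hwbl, ?_⟩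
    apply (PySem.Chars.exists_prefix_drop_iff_isIn w.toList s).mp
    exact ⟨((0 : Int) + (k : Int)).toNat, (PySem.Chars.startswith_iff _ _).mp hsw⟩

-- ===== VERDICT (by name: the statement is the Claim_ definition above) =====
theorem is_definitely_not_company_spec : Claim_equal_is_definitely_not_company := by
  intro description label _
  unfold Spec_is_definitely_not_company
  cases description with
  | none => rfl
  | some d =>
    simp only [is_definitely_not_company, is_definitely_not_company_alt]
    by_cases hd : d.toList = []
    · simp [hd]
    · simp only [if_neg hd]
      have h := pvKey (PySem.Str.lower d).toList
      simp only [PySem.Str.isIn_eq] at *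
      simp only [h]
      simp
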